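-- pv_equiv track=rewrite | github.com/RuiFilipeCampos/exercises | leetcode/6.py | convert
-- ===== SOURCE A (Python) =====
-- def convert(s: str, numRows: int) -> str:
--
--     if numRows == 1:
--         return s
--
--     rows = [[] for _ in range(numRows)]
--     i = 0
--     up = True
--     for char in s:
--         rows[i].append(char)
--         if up:
--             if i == numRows - 1:
--                 i -= 1
--                 up = False
--             else:
--                 i += 1
--
--         elif up is False:
--             if i == 0:
--                 i += 1
--                 up = True
--             else:
--                 i -= 1
--     result = ""
--
--     for row in rows:
--         result += "".join(row)
--     return result
-- ===== SOURCE B (Python) =====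
-- def convert(s: str, numRows: int) -> str:
--     if numRows == 1:
--         return s
--     cycle = 2 * numRows - 2
--     n = len(s)
--     out = []
--     for r in range(numRows):
--         for j in range(r, n, cycle):
--             out.append(s[j])
--             k = j + cycle - 2 * r
--             if 0 < r < numRows - 1 and k < n:
--                 out.append(s[k])
--     return "".join(out)
-- ===== Notes on version B (the rewrite author's own statement) =====
-- stated objective: alternative
-- what changed: Replaces A's stateful up/down walk that appends every character into per-row bucket lists by direct per-row index arithmetic: row r's characters are read straight from s at positions r, r+cycle, r+2*cycle, ... (plus the middle-row companion j+cycle-2*r), so the bucket lists, the direction flag and the final row concatenation disappear.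
-- outside the precondition, e.g. on convert('a', 0): A raises IndexError, B returns ''
import Mathlib
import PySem

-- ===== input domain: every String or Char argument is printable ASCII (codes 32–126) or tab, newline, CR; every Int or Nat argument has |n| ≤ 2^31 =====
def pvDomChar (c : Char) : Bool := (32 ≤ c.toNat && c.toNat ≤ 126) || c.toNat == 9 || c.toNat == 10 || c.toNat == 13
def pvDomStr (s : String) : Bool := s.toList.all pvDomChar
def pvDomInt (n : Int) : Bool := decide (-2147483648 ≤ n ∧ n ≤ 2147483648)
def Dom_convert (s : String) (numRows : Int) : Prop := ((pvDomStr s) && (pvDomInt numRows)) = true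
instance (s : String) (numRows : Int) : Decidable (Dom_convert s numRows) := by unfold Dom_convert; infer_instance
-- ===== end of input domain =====

-- B replaces A's stateful up/down walk over row buckets by reading each row's characters directly at indices r, r+cycle, r+2*cycle, ... (middle rows also j+cycle-2*r); objective: alternative decomposition, same cost.

-- ===== PORT A =====
-- the body of A's `for char in s` loop (rows[i].append(char); then move i and flip `up`)
def convertStep (numRows : Int) (st : List (List Char) × Int × Bool) (c : Char) :
    List (List Char) × Int × Bool :=
  let rows := st.1.set st.2.1.toNat (st.1.getD st.2.1.toNat [] ++ [c])
  let i := st.2.1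
  if st.2.2 then
    if i == numRows - 1 then (rows, i - 1, false) else (rows, i + 1, true)
  else
    if i == 0 then (rows, i + 1, true) else (rows, i - 1, false)

def convert (s : String) (numRows : Int) : String :=
  if numRows == 1 then s
  else
    let init : List (List Char) := List.replicate numRows.toNat []
    let fin := s.toList.foldl (convertStep numRows) (init, 0, true)
    -- result = ""; for row in rows: result += "".join(row)  (built on the char-list side)
    String.ofList (fin.1.foldl (fun acc row => acc ++ row) [])

-- ===== PORT B =====
def convert_alt (s : String) (numRows : Int) : String :=
  if numRows == 1 then s
  else
    let cycle := 2 * numRows - 2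
    let n := PySem.List.len s.toList
    let cs := s.toList
    -- out = []; for r in range(numRows): for j in range(r, n, cycle): append s[j],
    --   and for middle rows also append s[j + cycle - 2*r] when in range; "".join(out)
    let out := (PySem.List.pyRange 0 numRows).foldl (fun out r =>
      (PySem.List.pyRange r n cycle).foldl (fun out j =>
        let out' := out ++ [PySem.List.pyGetD cs j ' ']
        let k := j + cycle - 2 * r
        if 0 < r ∧ r < numRows - 1 ∧ k < n then out' ++ [PySem.List.pyGetD cs k ' ']
        else out') out) []
    String.ofList out

-- ===== PRECONDITION & SPEC =====
-- Pre_ excludes only numRows ≤ 0 with a nonempty s, where A raises IndexError (rows is empty).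
def Pre_convert (s : String) (numRows : Int) : Prop := 1 ≤ numRows ∨ s = ""
instance (s : String) (numRows : Int) : Decidable (Pre_convert s numRows) := by
  unfold Pre_convert; infer_instance
def pvWitness_convert : String × Int := ("PAYPALISHIRING", 3)

def Spec_convert (s : String) (numRows : Int) (out : String) : Prop := out = convert_alt s numRows
instance (s : String) (numRows : Int) (out : String) : Decidable (Spec_convert s numRows out) := by
  unfold Spec_convert; infer_instance

-- ===== CLAIM (what is proved, stated in full; the proofs are below) =====
def Claim_equal_convert : Prop := ∀ (s : String) (numRows : Int), Dom_convert s numRows →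
  Pre_convert s numRows → Spec_convert s numRows (convert s numRows)

-- ===== LEMMAS AND PROOFS =====

def pvCyc (n : Nat) : Nat := 2 * n - 2

def pvRow (n j : Nat) : Nat :=
  if j % pvCyc n < n then j % pvCyc n else pvCyc n - j % pvCyc n

def pvUp (n k : Nat) : Bool :=
  decide (k = 0 ∨ (1 ≤ k % pvCyc n ∧ k % pvCyc n ≤ n - 1))
-- A's row buckets after the first k characters have been placed

def pvRows (n : Nat) (cs : List Char) (k : Nat) : List (List Char) :=
  (List.range n).map (fun r =>
    ((List.range k).filter (fun j => pvRow n j == r)).map (fun j => cs.getD j ' '))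
-- the common normal form: rows concatenated, each row listing its character indices in order

def pvCanon (n : Nat) (cs : List Char) : List Char :=
  (List.range n).flatMap (fun r =>
    ((List.range cs.length).filter (fun j => pvRow n j == r)).map (fun j => cs.getD j ' '))

lemma pv_succ_mod (c k : Nat) (hc : 2 ≤ c) :
    (k + 1) % c = if k % c + 1 = c then 0 else k % c + 1 := by
  have h1 : 1 % c = 1 := Nat.mod_eq_of_lt (by omega)
  have hm : k % c < c := Nat.mod_lt _ (by omega)
  rw [Nat.add_mod, h1]
  split_ifs with h
  · rw [h, Nat.mod_self]
  · exact Nat.mod_eq_of_lt (by omega)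

lemma pv_idx_step (n k : Nat) (hn : 2 ≤ n) :
    ((if pvUp n k then
        (if ((pvRow n k : Int) == (n : Int) - 1) then ((pvRow n k : Int) - 1, false)
         else ((pvRow n k : Int) + 1, true))
      else
        (if ((pvRow n k : Int) == 0) then ((pvRow n k : Int) + 1, true)
         else ((pvRow n k : Int) - 1, false))) : Int × Bool)
      = ((pvRow n (k + 1) : Int), pvUp n (k + 1)) := by
  have hc : 2 ≤ 2 * n - 2 := by omega
  have hm : k % (2 * n - 2) < 2 * n - 2 := Nat.mod_lt _ (by omega)
  have hs := pv_succ_mod (2 * n - 2) k hc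
  simp only [pvRow, pvUp, pvCyc, beq_iff_eq]
  obtain ⟨a, hA⟩ : ∃ a, k % (2 * n - 2) = a := ⟨_, rfl⟩
  obtain ⟨b, hB⟩ : ∃ b, (k + 1) % (2 * n - 2) = b := ⟨_, rfl⟩
  have ha0 : k = 0 → a = 0 := by rintro rfl; rw [Nat.zero_mod] at hA; omega
  simp only [hA, hB] at hm hs ⊢
  split_ifs at hs ⊢ <;>
  · simp only [decide_eq_true_eq] at *
    rw [Prod.mk.injEq]
    exact ⟨by omega, by symm; simp only [decide_eq_true_eq, decide_eq_false_iff_not, false_or]; omega⟩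

lemma pvRow_lt (n j : Nat) (hn : 2 ≤ n) : pvRow n j < n := by
  have hm : j % pvCyc n < pvCyc n := Nat.mod_lt _ (by unfold pvCyc; omega)
  unfold pvRow; unfold pvCyc at *
  split_ifs <;> omega

lemma pv_rows_step (n : Nat) (hn : 2 ≤ n) (cs : List Char) (k : Nat) (hk : k < cs.length) :
    (pvRows n cs k).set (pvRow n k) ((pvRows n cs k).getD (pvRow n k) [] ++ [cs[k]])
      = pvRows n cs (k + 1) := by
  have hp : pvRow n k < n := pvRow_lt n k hn
  have hlen : (pvRows n cs k).length = n := by simp [pvRows]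
  have hgetD : (pvRows n cs k).getD (pvRow n k) []
      = ((List.range k).filter (fun j => pvRow n j == pvRow n k)).map (fun j => cs.getD j ' ') := by
    rw [List.getD_eq_getElem _ _ (by omega)]
    simp [pvRows]
  apply List.ext_getElem
  · simp [pvRows]
  · intro r h1 h2
    have hrn : r < n := by simpa [pvRows] using h2
    rw [List.getElem_set (by omega)]
    by_cases hr : pvRow n k = r
    · rw [if_pos hr, hgetD, hr]
      simp only [pvRows, List.getElem_map, List.getElem_range]
      rw [List.range_succ, List.filter_append, List.map_append]
      simp [hr, List.getElem?_eq_getElem hk]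
    · rw [if_neg hr]
      simp only [pvRows, List.getElem_map, List.getElem_range]
      rw [List.range_succ, List.filter_append, List.map_append]
      simp [hr]

lemma pv_stepA (n : Nat) (hn : 2 ≤ n) (cs : List Char) (k : Nat) (hk : k < cs.length) :
    convertStep (n : Int) (pvRows n cs k, ((pvRow n k : Nat) : Int), pvUp n k) cs[k]
      = (pvRows n cs (k + 1), ((pvRow n (k + 1) : Nat) : Int), pvUp n (k + 1)) := by
  have hrows := pv_rows_step n hn cs k hk
  have hidx := pv_idx_step n k hn
  simp only [convertStep, Int.toNat_natCast] at *
  cases hup : pvUp n k <;> rw [hup] at hidx <;>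
    simp only [if_true, if_false, Bool.false_eq_true] at hidx ⊢ <;>
    split_ifs at hidx ⊢ <;>
    rw [Prod.mk.injEq] at hidx ⊢ <;>
    exact ⟨hrows, by rw [hidx.1, hidx.2]⟩

lemma pv_fold_inv (n : Nat) (hn : 2 ≤ n) (cs : List Char) (k : Nat) (hk : k ≤ cs.length) :
    (cs.drop k).foldl (convertStep (n : Int))
        (pvRows n cs k, ((pvRow n k : Nat) : Int), pvUp n k)
      = (pvRows n cs cs.length, ((pvRow n cs.length : Nat) : Int), pvUp n cs.length) := by
  induction h : cs.length - k generalizing k with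
  | zero =>
    have : k = cs.length := by omega
    subst this
    simp [List.drop_length]
  | succ m ih =>
    have hk' : k < cs.length := by omega
    rw [List.drop_eq_getElem_cons hk', List.foldl_cons, pv_stepA n hn cs k hk']
    exact ih (k + 1) (by omega) (by omega)

lemma pv_A_eq_canon (n : Nat) (hn : 2 ≤ n) (cs : List Char) :
    ((cs.foldl (convertStep (n : Int)) (List.replicate n ([] : List Char), 0, true)).1.foldl
        (fun acc row => acc ++ row) [])
      = pvCanon n cs := by
  have h0 : pvRows n cs 0 = List.replicate n [] := by
    simp [pvRows, List.map_const']
  have h1 : pvRow n 0 = 0 := by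
    unfold pvRow
    rw [Nat.zero_mod, if_pos (by omega)]
  have h2 : pvUp n 0 = true := by simp [pvUp]
  have hfold := pv_fold_inv n hn cs 0 (by omega)
  rw [List.drop_zero, h0, h1, h2, Nat.cast_zero] at hfold
  rw [hfold]
  rw [PySem.List.foldl_append_eq_flatMap (fun x => x) _ []]
  simp [pvRows, pvCanon, List.flatMap_map]

lemma pv_foldl_append_replicate (m : Nat) :
    (List.replicate m ([] : List Char)).foldl (fun acc row => acc ++ row) [] = [] := by
  induction m with
  | zero => rfl
  | succ p ih => simpa [List.replicate_succ] using ih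

lemma pv_pyRange_nil (a b s : Int) (hs : 0 < s) (hab : b ≤ a) :
    PySem.List.pyRange a b s = [] := by
  unfold PySem.List.pyRange
  rw [if_neg (by omega : ¬ (s = 0))]
  simp only [if_pos hs, if_neg (by omega : ¬ a < b), List.range_zero, List.map_nil]

lemma pv_pyRange_cons (a b s : Int) (hs : 0 < s) (hab : a < b) :
    PySem.List.pyRange a b s = a :: PySem.List.pyRange (a + s) b s := by
  have hD0 : 0 ≤ b - a - 1 := by omega
  have hdiv : 0 ≤ (b - a - 1) / s := Int.ediv_nonneg hD0 (by omega)
  have hkey : (b - a + s - 1) / s = (b - a - 1) / s + 1 := by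
    have h := Int.add_mul_ediv_right (b - a - 1) 1 (by omega : s ≠ 0)
    rw [one_mul] at h
    rw [show b - a + s - 1 = b - a - 1 + s by ring, h]
  have hs0 : ¬ (s = 0) := by omega
  unfold PySem.List.pyRange
  rw [if_neg hs0, if_neg hs0, if_pos hs, if_pos hs, if_pos hab]
  by_cases h2 : a + s < b
  · rw [if_pos h2, show b - (a + s) + s - 1 = b - a - 1 by ring, hkey,
      show ((b - a - 1) / s + 1).toNat = ((b - a - 1) / s).toNat + 1 by omega]
    simp only [List.range_succ_eq_map, List.map_cons, Nat.cast_zero, mul_zero, add_zero,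
      List.map_map]
    congr 1
    apply List.map_congr_left
    intro k _
    simp only [Function.comp_apply]
    push_cast
    ring
  · rw [if_neg h2]
    have h0 : (b - a - 1) / s = 0 := Int.ediv_eq_zero_of_lt hD0 (by omega)
    rw [hkey, h0]
    simp

lemma pv_sorted_ext (l1 l2 : List Nat) (h1 : l1.Pairwise (· < ·)) (h2 : l2.Pairwise (· < ·))
    (hm : ∀ x, x ∈ l1 ↔ x ∈ l2) : l1 = l2 := by
  refine List.eq_of_perm_of_sorted (le := (· < ·)) (fun a b _ _ hab hba => by omega) h1 h2 ?_
  rw [List.perm_ext_iff_of_nodup (h1.imp Nat.ne_of_lt) (h2.imp Nat.ne_of_lt)]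
  exact hm

-- the characters of one zigzag period starting at a block head a (a % cyc = r)

lemma pv_mod_window (n a x : Nat) (hn : 2 ≤ n) (r : Nat) (ha : a % pvCyc n = r)
    (hax : a ≤ x) (hxa : x < a + pvCyc n) :
    x % pvCyc n = if x - a + r < pvCyc n then x - a + r else x - a + r - pvCyc n := by
  have hc : 0 < pvCyc n := by unfold pvCyc; omega
  have hr : r < pvCyc n := ha ▸ Nat.mod_lt a hc
  have h1 : x % pvCyc n = (r + (x - a)) % pvCyc n := by
    conv_lhs => rw [show x = a + (x - a) by omega]
    rw [Nat.add_mod, ha, Nat.mod_eq_of_lt (show x - a < pvCyc n by omega)]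
  rw [h1]
  split_ifs with h
  · rw [show r + (x - a) = x - a + r by ring, Nat.mod_eq_of_lt (by omega)]
  · rw [Nat.mod_eq_sub_mod (by omega), Nat.mod_eq_of_lt (by omega)]
    omega

lemma pv_block_split (n r a L : Nat) (hn : 2 ≤ n) (hr : r < n)
    (ha : a % pvCyc n = r) (haL : a < L) :
    ((a :: (if 0 < r ∧ r + 1 < n ∧ a + (pvCyc n - 2 * r) < L then [a + (pvCyc n - 2 * r)] else []))
        ++ (List.range L).filter (fun x => decide (a + pvCyc n ≤ x) && (pvRow n x == r)))
      = (List.range L).filter (fun x => decide (a ≤ x) && (pvRow n x == r)) := by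
  have hcy : pvCyc n = 2 * n - 2 := rfl
  apply pv_sorted_ext
  · rw [List.pairwise_append]
    refine ⟨?_, List.Pairwise.filter _ List.pairwise_lt_range, ?_⟩
    · split_ifs with h
      · exact List.pairwise_cons.mpr ⟨by intro y hy; simp only [List.mem_singleton] at hy; omega,
          by simp⟩
      · simp
    · intro x hx y hy
      have hy' : a + pvCyc n ≤ y := by
        simp only [List.mem_filter, Bool.and_eq_true, decide_eq_true_eq] at hy
        exact hy.2.1
      rcases List.mem_cons.mp hx with rfl | hx'
      · omega
      · split_ifs at hx' with h
        · simp only [List.mem_singleton] at hx'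
          omega
        · simp at hx'
  · exact List.Pairwise.filter _ List.pairwise_lt_range
  · intro x
    simp only [List.mem_append, List.mem_cons, List.mem_filter, List.mem_range,
      Bool.and_eq_true, decide_eq_true_eq, beq_iff_eq]
    have hrow : pvRow n x = if x % pvCyc n < n then x % pvCyc n else pvCyc n - x % pvCyc n := rfl
    have ha2 : a % (2 * n - 2) = r := by rw [← hcy]; exact ha
    by_cases hwin : a ≤ x ∧ x < a + pvCyc n
    · have hx := pv_mod_window n a x hn r ha hwin.1 hwin.2
      rw [hcy] at hx hwin
      rw [hrow, hcy, hx]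
      split_ifs <;> simp only [List.mem_singleton, List.not_mem_nil, or_false, false_or] <;> omega
    · rw [hcy] at hwin
      rw [hrow, hcy]
      have hxm : x % (2 * n - 2) < 2 * n - 2 := Nat.mod_lt _ (by omega)
      split_ifs <;> simp only [List.mem_singleton, List.not_mem_nil, or_false, false_or] <;> omega

lemma pv_row_eq (n r : Nat) (cs : List Char) (hn : 2 ≤ n) (hr : r < n) :
    ∀ (M a : Nat), cs.length ≤ a + M → a % pvCyc n = r →
    (PySem.List.pyRange (a : Int) (cs.length : Int) ((2 * n - 2 : Nat) : Int)).flatMap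
      (fun j =>
        [PySem.List.pyGetD cs j ' '] ++
        (if 0 < (r : Int) ∧ (r : Int) < (n : Int) - 1 ∧
            j + ((2 * n - 2 : Nat) : Int) - 2 * (r : Int) < (cs.length : Int)
         then [PySem.List.pyGetD cs (j + ((2 * n - 2 : Nat) : Int) - 2 * (r : Int)) ' ']
         else [])) =
      ((List.range cs.length).filter (fun x => decide (a ≤ x) && (pvRow n x == r))).map
        (fun j => cs.getD j ' ') := by
  intro M
  induction M with
  | zero =>
    intro a hle ha
    rw [pv_pyRange_nil _ _ _ (by omega) (by exact_mod_cast hle)]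
    rw [List.filter_eq_nil_iff.mpr (by
      intro x hx
      simp only [List.mem_range] at hx
      simp only [Bool.and_eq_true, decide_eq_true_eq, beq_iff_eq, not_and]
      intro hax
      omega)]
    rfl
  | succ M ih =>
    intro a hle ha
    by_cases haL : cs.length ≤ a
    · rw [pv_pyRange_nil _ _ _ (by omega) (by exact_mod_cast haL)]
      rw [List.filter_eq_nil_iff.mpr (by
        intro x hx
        simp only [List.mem_range] at hx
        simp only [Bool.and_eq_true, decide_eq_true_eq, beq_iff_eq, not_and]
        intro hax
        omega)]
      rfl
    · push_neg at haL
      have hcy2 : 2 ≤ 2 * n - 2 := by omega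
      rw [pv_pyRange_cons _ _ _ (by exact_mod_cast hcy2.trans_lt' (by omega))
            (by exact_mod_cast haL)]
      rw [List.flatMap_cons]
      have hcast : ((a : Int) + ((2 * n - 2 : Nat) : Int)) = ((a + (2 * n - 2) : Nat) : Int) := by
        omega
      rw [hcast, ih (a + (2 * n - 2)) (by omega)
        (by show (a + (2 * n - 2)) % (2 * n - 2) = r; rw [Nat.add_mod_right]; exact ha)]
      rw [← pv_block_split n r a cs.length hn hr ha haL]
      rw [List.map_append, List.map_cons]
      have hcond : (0 < (r : Int) ∧ (r : Int) < (n : Int) - 1 ∧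
            ((a + (pvCyc n - 2 * r) : Nat) : Int) < (cs.length : Int))
          ↔ (0 < r ∧ r + 1 < n ∧ a + (pvCyc n - 2 * r) < cs.length) := by
        unfold pvCyc
        omega
      have harg : (((a + (2 * n - 2) : Nat) : Int) - 2 * (r : Int))
          = ((a + (pvCyc n - 2 * r) : Nat) : Int) := by
        unfold pvCyc
        omega
      rw [harg, PySem.List.pyGetD_natCast, PySem.List.pyGetD_natCast]
      congr 1
      rw [if_congr hcond rfl rfl]
      split_ifs <;> simp

lemma pv_inner (cs : List Char) (numRows cycle len r : Int) (l : List Int) :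
    ∀ (acc : List Char),
      l.foldl (fun out j =>
        let out' := out ++ [PySem.List.pyGetD cs j ' ']
        let k := j + cycle - 2 * r
        if 0 < r ∧ r < numRows - 1 ∧ k < len then out' ++ [PySem.List.pyGetD cs k ' ']
        else out') acc
      = acc ++ l.flatMap (fun j =>
          [PySem.List.pyGetD cs j ' '] ++
          (if 0 < r ∧ r < numRows - 1 ∧ j + cycle - 2 * r < len
           then [PySem.List.pyGetD cs (j + cycle - 2 * r) ' '] else [])) := by
  induction l with
  | nil => intro acc; simp
  | cons j l ih =>
    intro acc
    rw [List.foldl_cons, List.flatMap_cons]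
    show l.foldl _ (if 0 < r ∧ r < numRows - 1 ∧ j + cycle - 2 * r < len
        then (acc ++ [PySem.List.pyGetD cs j ' ']) ++ [PySem.List.pyGetD cs (j + cycle - 2 * r) ' ']
        else acc ++ [PySem.List.pyGetD cs j ' ']) = _
    split_ifs with h <;> rw [ih] <;> simp [h]

lemma pv_B_eq_canon (n : Nat) (hn : 2 ≤ n) (cs : List Char) :
    ((PySem.List.pyRange 0 (n : Int)).foldl (fun out r =>
      (PySem.List.pyRange r (PySem.List.len cs) (2 * (n : Int) - 2)).foldl (fun out j =>
        let out' := out ++ [PySem.List.pyGetD cs j ' ']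
        let k := j + (2 * (n : Int) - 2) - 2 * r
        if 0 < r ∧ r < (n : Int) - 1 ∧ k < PySem.List.len cs
        then out' ++ [PySem.List.pyGetD cs k ' ']
        else out') out) [])
    = pvCanon n cs := by
  have hcy : (2 * (n : Int) - 2) = ((2 * n - 2 : Nat) : Int) := by omega
  simp only [PySem.List.len_eq, hcy, pv_inner]
  rw [PySem.List.foldl_append_eq_flatMap, List.nil_append, PySem.List.pyRange_zero_natCast,
    List.flatMap_map]
  unfold pvCanon
  apply List.flatMap_congr
  intro r hr
  rw [List.mem_range] at hr
  rw [pv_row_eq n r cs hn hr cs.length r (by omega)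
    (Nat.mod_eq_of_lt (by unfold pvCyc; omega))]
  congr 1
  apply List.filter_congr
  intro x _
  by_cases h : pvRow n x = r
  · have hrx : r ≤ x := by
      by_contra hlt
      push_neg at hlt
      have hxx : x % pvCyc n = x := Nat.mod_eq_of_lt (by unfold pvCyc; omega)
      have hx2 : pvRow n x = x := by unfold pvRow; rw [hxx, if_pos (by omega)]
      omega
    simp [h, hrx]
  · simp [h]

-- ===== VERDICT (by name: the statement is the Claim_ definition above) =====
theorem convert_spec : Claim_equal_convert := by
  intro s numRows hdom hpre
  unfold Spec_convert convert convert_alt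
  by_cases h1 : numRows = 1
  · simp [h1]
  · have hne : (numRows == 1) = false := by simp [h1]
    rw [hne]
    simp only [Bool.false_eq_true, if_false]
    by_cases hge : 2 ≤ numRows
    · obtain ⟨n, rfl⟩ : ∃ n : Nat, numRows = (n : Int) :=
        ⟨numRows.toNat, (Int.toNat_of_nonneg (by omega)).symm⟩
      have hn : 2 ≤ n := by exact_mod_cast hge
      show String.ofList _ = String.ofList _
      apply congrArg
      exact ((Int.toNat_natCast n) ▸ pv_A_eq_canon n hn s.toList).trans
        (pv_B_eq_canon n hn s.toList).symm
    · have hemp : s = "" := by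
        rcases hpre with h | h
        · omega
        · exact h
      subst hemp
      show String.ofList _ = String.ofList _
      apply congrArg
      have hA : ("".toList) = ([] : List Char) := rfl
      rw [pv_pyRange_nil 0 numRows 1 one_pos (by omega)]
      simp [hA, pv_foldl_append_replicate]
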